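-- pv_equiv track=rewrite | github.com/ericdunham/farmers-market | .tox/py36/lib/python3.6/site-packages/market/market.py | bogo_verbose
-- ===== SOURCE A (Python) =====
-- def bogo_verbose(basket):
--     """Applies the BOGO discount to the `basket`, if applicable.
--
--     .. deprecated:: 0.0.1
--         Use :func:`bogo` instead.
--
--     :param list(str) basket: The basket to apply the BOGO discount to.
--     :returns: The `basket` with the applicable discount applied.
--     :rtype: list(str)
--     """
--     if basket.count('CF1') <= 1:
--         return basket
--     discounted_basket = []
--     eligible_for_discount = False
--     for item in basket:
--         discounted_basket.append(item)
--         if item == 'CF1':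
--             if eligible_for_discount:
--                 discounted_basket.append('BOGO')
--                 eligible_for_discount = False
--             else:
--                 eligible_for_discount = True
--     return discounted_basket
-- ===== SOURCE B (Python) =====
-- def bogo_verbose(basket):
--     """Applies the BOGO discount to the `basket`, if applicable."""
--     if basket.count('CF1') <= 1:
--         return basket
--     cf1_positions = [i for i, x in enumerate(basket) if x == 'CF1']
--     insert_after = {p for k, p in enumerate(cf1_positions) if k % 2 == 1}
--     result = []
--     for i, item in enumerate(basket):
--         result.append(item)
--         if i in insert_after:
--             result.append('BOGO')
--     return result
-- ===== Notes on version B (the rewrite author's own statement) =====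
-- stated objective: alternative
-- what changed: Replaces A's single pass threading a running eligibility toggle with a precomputed table of CF1 indices whose every-second entries become an insertion-point set, followed by one indexed emission pass.
import Mathlib
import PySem

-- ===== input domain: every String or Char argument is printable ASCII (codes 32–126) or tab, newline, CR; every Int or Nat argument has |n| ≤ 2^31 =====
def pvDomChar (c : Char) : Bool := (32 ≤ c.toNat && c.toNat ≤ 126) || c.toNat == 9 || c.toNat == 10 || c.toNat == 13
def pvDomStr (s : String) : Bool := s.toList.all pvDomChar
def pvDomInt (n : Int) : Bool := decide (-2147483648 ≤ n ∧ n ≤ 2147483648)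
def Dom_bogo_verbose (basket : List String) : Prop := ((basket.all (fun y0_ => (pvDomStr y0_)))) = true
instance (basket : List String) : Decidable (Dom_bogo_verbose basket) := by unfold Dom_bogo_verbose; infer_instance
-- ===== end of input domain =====

-- B replaces A's running eligibility toggle by a precomputed CF1 index table whose every-second
-- entries form an insertion-point set used in one indexed emission pass (objective: alternative).
-- When at most one 'CF1' occurs both return the argument list itself (identity, not a copy).

-- ===== PORT A =====
-- A's loop body: append the item; on 'CF1' toggle the eligibility flag, emitting 'BOGO' when set
def bogoStepA (s : List String × Bool) (item : String) : List String × Bool :=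
  let acc := s.1 ++ [item]
  if item == "CF1" then
    if s.2 then (acc ++ ["BOGO"], false) else (acc, true)
  else (acc, s.2)

def bogo_verbose (basket : List String) : List String :=
  if PySem.List.count basket "CF1" ≤ 1 then basket
  else (basket.foldl bogoStepA ([], false)).1

-- ===== PORT B =====
def bogo_verbose_alt (basket : List String) : List String :=
  if PySem.List.count basket "CF1" ≤ 1 then basket
  else
    let cf1_positions :=
      ((PySem.List.enumerate basket).filter (fun p => p.2 == "CF1")).map (fun p => p.1)
    let insert_after : PySem.Set Int :=
      PySem.Set.ofList
        (((PySem.List.enumerate cf1_positions).filter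
            (fun p => PySem.Int.mod p.1 2 == 1)).map (fun p => p.2))
    (PySem.List.enumerate basket).foldl (fun result p =>
      let result := result ++ [p.2]
      if PySem.Set.contains insert_after p.1 then result ++ ["BOGO"] else result) []

-- ===== PRECONDITION & SPEC =====
def Spec_bogo_verbose (basket : List String) (out : List String) : Prop := out = bogo_verbose_alt basket
instance (basket : List String) (out : List String) : Decidable (Spec_bogo_verbose basket out) := by unfold Spec_bogo_verbose; infer_instance

-- ===== CLAIM (what is proved, stated in full; the proofs are below) =====
def Claim_equal_bogo_verbose : Prop := ∀ (basket : List String), Dom_bogo_verbose basket → Spec_bogo_verbose basket (bogo_verbose basket)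

-- ===== LEMMAS AND PROOFS =====

-- canonical emission: walk the list with the "next CF1 gets BOGO" flag
def bogoCanon : List String → Bool → List String
  | [], _ => []
  | x :: xs, flag =>
    if x == "CF1" then
      if flag then x :: "BOGO" :: bogoCanon xs false
      else x :: bogoCanon xs true
    else x :: bogoCanon xs flag

-- indices of CF1 occurrences, counting from n
def cf1Pos (n : Int) : List String → List Int
  | [] => []
  | x :: xs => if x == "CF1" then n :: cf1Pos (n+1) xs else cf1Pos (n+1) xs

-- sel true keeps the elements at even offsets, sel false those at odd offsets
def sel : Bool → List Int → List Int
  | _, [] => []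
  | b, a :: l => (if b then [a] else []) ++ sel (!b) l

lemma sel_cons_true (a : Int) (l : List Int) : sel true (a :: l) = a :: sel false l := by
  simp [sel]

lemma sel_cons_false (a : Int) (l : List Int) : sel false (a :: l) = sel true l := by
  simp [sel]

def endFlag : List String → Bool → Bool
  | [], f => f
  | x :: xs, f => endFlag xs (if x == "CF1" then !f else f)

lemma loopA_eq (xs : List String) (acc : List String) (flag : Bool) :
    xs.foldl bogoStepA (acc, flag) = (acc ++ bogoCanon xs flag, endFlag xs flag) := by
  induction xs generalizing acc flag with
  | nil => simp [bogoCanon, endFlag]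
  | cons x xs ih =>
    rw [List.foldl_cons]
    by_cases hx : x == "CF1"
    · cases flag with
      | true =>
        have h1 : bogoStepA (acc, true) x = (acc ++ [x] ++ ["BOGO"], false) := by
          simp [bogoStepA, hx]
        rw [h1, ih]
        simp [bogoCanon, endFlag, hx]
      | false =>
        have h1 : bogoStepA (acc, false) x = (acc ++ [x], true) := by
          simp [bogoStepA, hx]
        rw [h1, ih]
        simp [bogoCanon, endFlag, hx]
    · have h1 : bogoStepA (acc, flag) x = (acc ++ [x], flag) := by
        simp [bogoStepA, hx]
      rw [h1, ih]
      simp [bogoCanon, endFlag, hx]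

lemma pos_eq (xs : List String) (n : Int) :
    ((PySem.List.enumerate xs n).filter (fun p => p.2 == "CF1")).map (fun p => p.1)
      = cf1Pos n xs := by
  induction xs generalizing n with
  | nil => simp [cf1Pos]
  | cons x xs ih =>
    by_cases hx : x == "CF1" <;>
      simp [PySem.List.enumerate_cons, hx, ih, cf1Pos]

lemma oddsel_eq (l : List Int) (n : Int) :
    ((PySem.List.enumerate l n).filter (fun p => PySem.Int.mod p.1 2 == 1)).map (fun p => p.2)
      = sel (PySem.Int.mod n 2 == 1) l := by
  induction l generalizing n with
  | nil => simp [sel]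
  | cons a l ih =>
    rw [PySem.List.enumerate_cons]
    have hm : PySem.Int.mod n 2 = n % 2 := PySem.Int.mod_eq_emod_of_pos (by norm_num)
    have hm1 : PySem.Int.mod (n+1) 2 = (n+1) % 2 := PySem.Int.mod_eq_emod_of_pos (by norm_num)
    rcases Int.emod_two_eq_zero_or_one n with h | h
    · have h1 : (n+1) % 2 = 1 := by omega
      have h2 := ih (n+1)
      simp [h1] at h2
      simp [h, h2, sel]
    · have h1 : (n+1) % 2 = 0 := by omega
      have h2 := ih (n+1)
      simp [h1] at h2
      simp [h, h2, sel]

lemma mem_cf1Pos_ge (xs : List String) (n i : Int) (h : i ∈ cf1Pos n xs) : n ≤ i := by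
  induction xs generalizing n with
  | nil => simp [cf1Pos] at h
  | cons x xs ih =>
    by_cases hx : x == "CF1" <;> simp [cf1Pos, hx] at h
    · rcases h with h | h
      · omega
      · have := ih (n+1) h; omega
    · have := ih (n+1) h; omega

lemma mem_sel (b : Bool) (l : List Int) (i : Int) (h : i ∈ sel b l) : i ∈ l := by
  induction l generalizing b with
  | nil => simp [sel] at h
  | cons a l ih =>
    cases b <;> simp [sel] at h <;> simp
    · exact Or.inr (ih _ h)
    · rcases h with h | h
      · exact Or.inl h
      · exact Or.inr (ih _ h)

lemma contains_false_of_not_mem (l : List Int) (i : Int) (h : i ∉ l) : l.contains i = false := by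
  cases hb : l.contains i
  · rfl
  · exact absurd (by simpa using hb) h

lemma flat_eq (xs : List String) (n : Int) (flag : Bool) (S : List Int)
    (hS : ∀ i : Int, n ≤ i → S.contains i = (sel flag (cf1Pos n xs)).contains i) :
    (PySem.List.enumerate xs n).flatMap
        (fun p => p.2 :: if S.contains p.1 then ["BOGO"] else [])
      = bogoCanon xs flag := by
  induction xs generalizing n flag with
  | nil => simp [bogoCanon]
  | cons x xs ih =>
    have hnot : ∀ (b : Bool), ¬ (n ∈ sel b (cf1Pos (n+1) xs)) := by
      intro b hmem
      have := mem_cf1Pos_ge xs (n+1) n (mem_sel _ _ _ hmem)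
      omega
    by_cases hx : x == "CF1"
    · cases flag with
      | true =>
        have hn : S.contains n = true := by
          rw [hS n le_rfl]
          simp [cf1Pos, hx, sel_cons_true]
        rw [PySem.List.enumerate_cons]
        simp only [List.flatMap_cons, hn]
        have e1 : sel true (cf1Pos n (x :: xs)) = n :: sel false (cf1Pos (n+1) xs) := by
          simp [cf1Pos, hx, sel_cons_true]
        rw [ih (n+1) false (fun i hi => by
          rw [hS i (by omega), e1, List.contains_cons]
          have hne : (i == n) = false := by simp; omega
          simp [hne])]
        simp [bogoCanon, hx]
      | false =>
        have hn : S.contains n = false := by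
          rw [hS n le_rfl]
          apply contains_false_of_not_mem
          have e : sel false (cf1Pos n (x :: xs)) = sel true (cf1Pos (n+1) xs) := by
            simp [cf1Pos, hx, sel_cons_false]
          rw [e]; exact hnot true
        rw [PySem.List.enumerate_cons]
        simp only [List.flatMap_cons, hn]
        rw [ih (n+1) true (fun i hi => by
          rw [hS i (by omega)]
          simp [cf1Pos, hx, sel_cons_false])]
        simp [bogoCanon, hx]
    · have hn : S.contains n = false := by
        rw [hS n le_rfl]
        have hxx : (if x == "CF1" then n :: cf1Pos (n+1) xs else cf1Pos (n+1) xs)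
            = cf1Pos (n+1) xs := by simp [hx]
        simp only [cf1Pos, hxx]
        simp
        exact hnot flag
      rw [PySem.List.enumerate_cons]
      simp only [List.flatMap_cons, hn]
      rw [ih (n+1) flag (fun i hi => by
        rw [hS i (by omega)]
        have hxx : (if x == "CF1" then n :: cf1Pos (n+1) xs else cf1Pos (n+1) xs)
            = cf1Pos (n+1) xs := by simp [hx]
        simp only [cf1Pos, hxx])]
      simp [bogoCanon, hx]

lemma contains_set (L : List Int) (i : Int) :
    PySem.Set.contains (PySem.Set.ofList L) i = L.contains i := by
  rw [PySem.Set.contains_eq_listContains]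
  by_cases h : i ∈ L <;>
    simp [PySem.Set.mem_ofList, h]

-- ===== VERDICT (by name: the statement is the Claim_ definition above) =====
theorem bogo_verbose_spec : Claim_equal_bogo_verbose := by
  intro basket _
  unfold Spec_bogo_verbose bogo_verbose bogo_verbose_alt
  by_cases hc : PySem.List.count basket "CF1" ≤ 1
  · rw [if_pos hc, if_pos hc]
  · rw [if_neg hc, if_neg hc, loopA_eq]
    have hstep :
        (fun (result : List String) (p : Int × String) =>
          let result := result ++ [p.2]
          if PySem.Set.contains
              (PySem.Set.ofList
                (((PySem.List.enumerate
                    (((PySem.List.enumerate basket).filter (fun p => p.2 == "CF1")).map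
                      (fun p => p.1))).filter
                    (fun p => PySem.Int.mod p.1 2 == 1)).map (fun p => p.2)))
              p.1
          then result ++ ["BOGO"] else result)
        = fun result p =>
            result ++ (p.2 :: if (sel false (cf1Pos 0 basket)).contains p.1
                              then ["BOGO"] else []) := by
      funext result p
      simp only [contains_set, pos_eq, oddsel_eq]
      have h0 : (PySem.Int.mod 0 2 == 1) = false := by
        rw [PySem.Int.mod_eq_emod_of_pos (by norm_num)]; decide
      rw [h0]
      split <;> simp
    simp only [hstep]
    rw [PySem.List.foldl_append_eq_flatMap, List.nil_append,
      flat_eq basket 0 false _ (fun i _ => rfl)]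
    rfl
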